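-- pv_equiv track=rewrite | github.com/tmasthay/CWasserstein | seqflow.py | clean_cmd
-- ===== SOURCE A (Python) =====
-- def clean_cmd(output_files, input_files, cmd):
--     for i in range(len(output_files)):
--         cmd = cmd.replace('${TARGETS[%d]}'%i, output_files[i])
--
--     for i in range(len(input_files)):
--         cmd = cmd.replace('${SOURCES[%d]}'%i, input_files[i])
--
--     y = [e.strip() for e in cmd.split('|')]
--     x = [e \
--         if e.split(' ')[0][:2] in ['sf', './'] \
--         else 'sf' + e for e in y]
--
--     if( len(input_files) > 0 ):
--         x[0] = '< ' + input_files[0] + ' ' + x[0]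
--     x[-1] = x[-1] + ' > ' + output_files[0]
--     return ' | '.join(x).replace('\n', '')
-- ===== SOURCE B (Python) =====
-- def clean_cmd(output_files, input_files, cmd):
--     # Build one table of placeholder -> filename, then substitute all
--     # placeholders in a single left-to-right scan of cmd.
--     subs = {}
--     for i, f in enumerate(output_files):
--         subs['${TARGETS[%d]}' % i] = f
--     for i, f in enumerate(input_files):
--         subs['${SOURCES[%d]}' % i] = f
--
--     out = []
--     i = 0
--     while i < len(cmd):
--         if cmd.startswith('${', i):
--             end = cmd.find('}', i)
--             if end != -1 and cmd[i:end + 1] in subs: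
--                 out.append(subs[cmd[i:end + 1]])
--                 i = end + 1
--                 continue
--         out.append(cmd[i])
--         i += 1
--     cmd = ''.join(out)
--
--     y = [e.strip() for e in cmd.split('|')]
--     x = [e \
--         if e.split(' ')[0][:2] in ['sf', './'] \
--         else 'sf' + e for e in y]
--
--     if( len(input_files) > 0 ):
--         x[0] = '< ' + input_files[0] + ' ' + x[0]
--     x[-1] = x[-1] + ' > ' + output_files[0]
--     return ' | '.join(x).replace('\n', '')
-- ===== Notes on version B (the rewrite author's own statement) =====
-- stated objective: faster
-- what changed: Instead of 2*len(files) full-string str.replace passes, B builds one dict mapping each placeholder string '${TARGETS[i]}'/'${SOURCES[i]}' to its filename and substitutes in a single left-to-right scan of cmd with a dict lookup per '${...}' occurrence; …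
import Mathlib
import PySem

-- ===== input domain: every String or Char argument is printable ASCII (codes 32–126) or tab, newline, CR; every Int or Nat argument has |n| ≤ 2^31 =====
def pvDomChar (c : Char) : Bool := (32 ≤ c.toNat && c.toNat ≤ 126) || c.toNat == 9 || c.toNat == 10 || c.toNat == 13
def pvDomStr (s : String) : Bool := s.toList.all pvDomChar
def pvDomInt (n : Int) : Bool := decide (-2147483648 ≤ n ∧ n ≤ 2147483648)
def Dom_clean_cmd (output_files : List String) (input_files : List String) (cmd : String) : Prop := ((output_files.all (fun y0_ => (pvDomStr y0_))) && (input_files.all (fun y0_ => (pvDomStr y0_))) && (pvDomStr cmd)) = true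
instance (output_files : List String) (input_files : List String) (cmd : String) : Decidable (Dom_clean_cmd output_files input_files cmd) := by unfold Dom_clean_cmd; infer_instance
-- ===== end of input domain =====

-- B replaces A's 2·len(files) full-string str.replace passes by one dict of
-- placeholder-string → filename plus a single left-to-right scan of cmd; pipeline logic unchanged.

-- ===== PORT A =====
def clean_cmd (output_files : List String) (input_files : List String) (cmd : String) : String :=
  let s1 := (PySem.List.pyRange 0 (output_files.length : Int) 1).foldl
    (fun s k => PySem.Chars.replace s ("${TARGETS[" ++ PySem.Int.toStr k ++ "]}").toList
      (PySem.List.pyGetD output_files k "").toList) cmd.toList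
  let s2 := (PySem.List.pyRange 0 (input_files.length : Int) 1).foldl
    (fun s k => PySem.Chars.replace s ("${SOURCES[" ++ PySem.Int.toStr k ++ "]}").toList
      (PySem.List.pyGetD input_files k "").toList) s1
  let y := (PySem.Chars.splitOn s2 ['|']).map PySem.Chars.strip
  let x := y.map (fun e =>
    if PySem.List.slice (PySem.List.pyGetD (PySem.Chars.splitOn e [' ']) 0 []) none (some 2) = ['s','f'] ∨
       PySem.List.slice (PySem.List.pyGetD (PySem.Chars.splitOn e [' ']) 0 []) none (some 2) = ['.','/']
    then e else 's' :: 'f' :: e)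
  let x := if 0 < input_files.length then
      x.set 0 ('<' :: ' ' :: ((PySem.List.pyGetD input_files 0 "").toList ++ ' ' :: PySem.List.pyGetD x 0 []))
    else x
  let x := x.set (x.length - 1)
      (PySem.List.pyGetD x (-1) [] ++ ' ' :: '>' :: ' ' :: (PySem.List.pyGetD output_files 0 "").toList)
  String.ofList (PySem.Chars.replace (PySem.Chars.join [' ', '|', ' '] x) ['\n'] [])

-- ===== PORT B =====
-- '${TARGETS[%d]}' % i  /  '${SOURCES[%d]}' % i
def pvKeyT (j : Int) : List Char := ("${TARGETS[" ++ PySem.Int.toStr j ++ "]}").toList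
def pvKeyS (j : Int) : List Char := ("${SOURCES[" ++ PySem.Int.toStr j ++ "]}").toList

-- the two dict-building loops of Source B
def pvSubs (output_files input_files : List String) : PySem.Dict (List Char) (List Char) :=
  (PySem.List.enumerate input_files).foldl (fun d p => d.insert (pvKeyS p.1) p.2.toList)
    ((PySem.List.enumerate output_files).foldl (fun d p => d.insert (pvKeyT p.1) p.2.toList)
      PySem.Dict.empty)

-- Source B's while-loop: at each position, if cmd starts with '${' and the slice up to the
-- next '}' is a key of subs, emit its value and jump past it; otherwise copy one char
def pvScan (subs : PySem.Dict (List Char) (List Char)) : List Char → List Char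
  | [] => []
  | c :: t =>
    if h : ['$', '{'].isPrefixOf (c :: t) ∧
        ((c :: t).takeWhile (fun x => x != '}')).length < (c :: t).length ∧
        (subs.get? ((c :: t).takeWhile (fun x => x != '}') ++ ['}'])).isSome then
      ((subs.get? ((c :: t).takeWhile (fun x => x != '}') ++ ['}'])).get h.2.2) ++
        pvScan subs ((c :: t).drop (((c :: t).takeWhile (fun x => x != '}')).length + 1))
    else c :: pvScan subs t
termination_by s => s.length
decreasing_by
  · simp only [List.length_drop, List.length_cons]; omega
  · simp

def clean_cmd_alt (output_files : List String) (input_files : List String) (cmd : String) : String :=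
  let s2 := pvScan (pvSubs output_files input_files) cmd.toList
  let y := (PySem.Chars.splitOn s2 ['|']).map PySem.Chars.strip
  let x := y.map (fun e =>
    if PySem.List.slice (PySem.List.pyGetD (PySem.Chars.splitOn e [' ']) 0 []) none (some 2) = ['s','f'] ∨
       PySem.List.slice (PySem.List.pyGetD (PySem.Chars.splitOn e [' ']) 0 []) none (some 2) = ['.','/']
    then e else 's' :: 'f' :: e)
  let x := if 0 < input_files.length then
      x.set 0 ('<' :: ' ' :: ((PySem.List.pyGetD input_files 0 "").toList ++ ' ' :: PySem.List.pyGetD x 0 []))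
    else x
  let x := x.set (x.length - 1)
      (PySem.List.pyGetD x (-1) [] ++ ' ' :: '>' :: ' ' :: (PySem.List.pyGetD output_files 0 "").toList)
  String.ofList (PySem.Chars.replace (PySem.Chars.join [' ', '|', ' '] x) ['\n'] [])

-- ===== PRECONDITION & SPEC =====
def pvIsDig (c : Char) : Bool := decide ('0' ≤ c ∧ c ≤ '9')

-- does the suffix u (starting with '$') begin with a complete placeholder '${TARGETS[digits]}' / '${SOURCES[digits]}'?
def pvOkDollar (u : List Char) : Bool :=
  [['T','A','R','G','E','T','S'], ['S','O','U','R','C','E','S']].any (fun name =>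
    let tag := '$' :: '{' :: name ++ ['[']
    tag.isPrefixOf u &&
      (let r := u.drop tag.length
       let d := r.takeWhile pvIsDig
       (!d.isEmpty) && [']','}'].isPrefixOf (r.drop d.length)))

-- Pre_ excludes: empty output_files (A raises IndexError on output_files[0]); and — only when cmd
-- actually contains a substitutable placeholder, a corner where sequential and simultaneous
-- substitution are both defensible and A's cascading re-replacement of already-substituted text is
-- accidental — filenames that are empty or contain '$' or '{', and a cmd in which some '${' does
-- not begin a complete '${TARGETS[i]}'/'${SOURCES[i]}' placeholder.
-- cmd mentions no substitutable placeholder at all (then both sides substitute nothing)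
def pvNoPh (output_files input_files : List String) (cmd : String) : Prop :=
  (∀ j < output_files.length,
    PySem.Chars.isIn ("${TARGETS[" ++ PySem.Int.toStr (j : Int) ++ "]}").toList cmd.toList = false) ∧
  (∀ j < input_files.length,
    PySem.Chars.isIn ("${SOURCES[" ++ PySem.Int.toStr (j : Int) ++ "]}").toList cmd.toList = false)

def Pre_clean_cmd (output_files : List String) (input_files : List String) (cmd : String) : Prop :=
  output_files ≠ [] ∧
  (pvNoPh output_files input_files cmd ∨
    ((∀ f ∈ output_files ++ input_files, '$' ∉ f.toList ∧ '{' ∉ f.toList ∧ f.toList ≠ []) ∧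
      ∀ u ∈ cmd.toList.tails, u.take 2 = ['$', '{'] → pvOkDollar u = true))

instance (output_files : List String) (input_files : List String) (cmd : String) :
    Decidable (Pre_clean_cmd output_files input_files cmd) := by
  unfold Pre_clean_cmd pvNoPh; infer_instance

def pvWitness_clean_cmd : List String × List String × String :=
  (["shot.rsf"], ["data.su"], "./prep n1=12 < ${SOURCES[0]} | sfspike | cat ${TARGETS[0]}")

def Spec_clean_cmd (output_files : List String) (input_files : List String) (cmd : String) (out : String) : Prop := out = clean_cmd_alt output_files input_files cmd
instance (output_files : List String) (input_files : List String) (cmd : String) (out : String) : Decidable (Spec_clean_cmd output_files input_files cmd out) := by unfold Spec_clean_cmd; infer_instance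

-- ===== CLAIM (what is proved, stated in full; the proofs are below) =====
def Claim_equal_clean_cmd : Prop := ∀ (output_files : List String) (input_files : List String) (cmd : String), Dom_clean_cmd output_files input_files cmd → Pre_clean_cmd output_files input_files cmd → Spec_clean_cmd output_files input_files cmd (clean_cmd output_files input_files cmd)

-- ===== LEMMAS AND PROOFS =====

-- the placeholder literal '${NAME[d]}'
def pvPat (b : Bool) (d : List Char) : List Char :=
  '$' :: '{' :: ((if b then ['T','A','R','G','E','T','S'] else ['S','O','U','R','C','E','S']) ++
    '[' :: d ++ [']', '}'])

-- canonical decimal digits of n (str(n) for n : Nat)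
def pvDig (n : Nat) : List Char :=
  if h : n < 10 then [Nat.digitChar n] else pvDig (n / 10) ++ [Nat.digitChar (n % 10)]
termination_by n
decreasing_by exact Nat.div_lt_self (by omega) (by omega)


-- token lists: a char (never '$') or a placeholder (name-flag, digit string)
def pvRender (f : Bool → List Char → List Char) (ts : List (Char ⊕ Bool × List Char)) : List Char :=
  ts.flatMap (fun t => match t with | .inl c => [c] | .inr p => f p.1 p.2)

def pvOkTs (ts : List (Char ⊕ Bool × List Char)) : Prop :=
  ∀ t ∈ ts, match t with
    | .inl _ => True
    | .inr p => p.2 ≠ [] ∧ ∀ c ∈ p.2, pvIsDig c = true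

-- a substituted value: no '$', no '{', nonempty
def pvGoodVal (v : List Char) : Prop := '$' ∉ v ∧ '{' ∉ v ∧ v ≠ []

def pvOkF (f : Bool → List Char → List Char) : Prop :=
  ∀ b d, f b d = pvPat b d ∨ pvGoodVal (f b d)

-- adjacency: a literal '$' is never directly followed by a literal '{'
def pvChainP (t1 t2 : Char ⊕ Bool × List Char) : Prop :=
  ¬ (t1 = Sum.inl '$' ∧ t2 = Sum.inl '{')

-- structural model of CPython str.replace (old ≠ [])
def pvMyRep (old new : List Char) : List Char → List Char
  | [] => []
  | c :: t =>
    if old ≠ [] ∧ old.isPrefixOf (c :: t) then new ++ pvMyRep old new ((c :: t).drop old.length)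
    else c :: pvMyRep old new t
termination_by s => s.length
decreasing_by
  · rename_i h
    have hle := (List.isPrefixOf_iff_prefix.mp h.2).length_le
    cases old with
    | nil => exact absurd rfl h.1
    | cons o os => simp only [List.length_drop, List.length_cons] at *; omega
  · simp

def pvVal (d : List Char) : Nat := d.foldl (fun a c => 10 * a + (c.toNat - 48)) 0

-- the simultaneous-substitution value of a placeholder
def pvStar (o i : List String) (b : Bool) (d : List Char) : List Char :=
  if (d.length = 1 ∨ d.head? ≠ some '0') ∧ pvVal d < (if b then o else i).length then
    (PySem.List.pyGetD (if b then o else i) (pvVal d : Int) "").toList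
  else pvPat b d

theorem pvDrop_takeWhile (p : Char → Bool) (l : List Char) :
    l.drop (l.takeWhile p).length = l.dropWhile p := by
  induction l with
  | nil => rfl
  | cons c t ih =>
    by_cases h : p c
    · simpa [List.takeWhile_cons, List.dropWhile_cons, h] using ih
    · simp [h]

theorem pvGo_eq (old new : List Char) (hold : old ≠ []) :
    ∀ (fuel : Nat) (l acc : List Char), l.length ≤ fuel →
      PySem.Chars.replace.go old new fuel l acc = acc.reverse ++ pvMyRep old new l := by
  intro fuel
  induction fuel with
  | zero =>
    intro l acc hl
    have hnil : l = [] := List.eq_nil_of_length_eq_zero (by omega)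
    subst hnil
    rw [PySem.Chars.replace.go.eq_def]
    simp [pvMyRep]
  | succ f ih =>
    intro l acc hl
    rw [PySem.Chars.replace.go.eq_def]
    cases l with
    | nil => simp [pvMyRep]
    | cons c t =>
      by_cases hp : old.isPrefixOf (c :: t)
      · have hlen : (List.drop old.length (c :: t)).length ≤ f := by
          have := (List.isPrefixOf_iff_prefix.mp hp).length_le
          cases old with
          | nil => exact absurd rfl hold
          | cons o os => simp only [List.length_drop, List.length_cons] at *; omega
        simp only [hp, if_true]
        rw [ih _ _ hlen, pvMyRep, if_pos ⟨hold, hp⟩]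
        simp
      · simp only [hp, if_false, Bool.false_eq_true]
        rw [ih t (c :: acc) (by simp at hl ⊢; omega), pvMyRep,
          if_neg (by intro hc; exact hp hc.2)]
        simp

theorem pvReplace_eq (old new s : List Char) (hold : old ≠ []) :
    PySem.Chars.replace s old new = pvMyRep old new s := by
  unfold PySem.Chars.replace
  rw [if_neg (by simpa using hold)]
  simpa using pvGo_eq old new hold s.length s [] le_rfl

theorem pvMyRep_nodollar (old new w rest : List Char) (hold : old.head? = some '$')
    (hw : ∀ c ∈ w, c ≠ '$') : pvMyRep old new (w ++ rest) = w ++ pvMyRep old new rest := by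
  induction w with
  | nil => simp
  | cons c t ih =>
    have hc : c ≠ '$' := hw c (by simp)
    rw [List.cons_append, pvMyRep, if_neg]
    · rw [ih (fun x hx => hw x (by simp [hx]))]; simp
    · intro hcon
      cases old with
      | nil => simp at hold
      | cons o os =>
        have hoc := (List.cons_prefix_cons.mp (List.isPrefixOf_iff_prefix.mp hcon.2)).1
        simp only [List.head?_cons, Option.some.injEq] at hold
        exact hc (hoc ▸ hold)

theorem pvMyRep_self (old new rest : List Char) (hold : old ≠ []) :
    pvMyRep old new (old ++ rest) = new ++ pvMyRep old new rest := by
  cases old with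
  | nil => exact absurd rfl hold
  | cons o os =>
    rw [List.cons_append, pvMyRep, if_pos]
    · simp
    · exact ⟨hold, List.isPrefixOf_iff_prefix.mpr (by exact ⟨rest, by simp⟩)⟩

theorem pvDigitCore_not_prefix (d1 d2 r1 r2 : List Char)
    (h1 : ∀ c ∈ d1, pvIsDig c = true) (h2 : ∀ c ∈ d2, pvIsDig c = true) (hne : d1 ≠ d2) :
    ¬ (d1 ++ ']' :: r1 <+: d2 ++ ']' :: r2) := by
  induction d1 generalizing d2 with
  | nil =>
    cases d2 with
    | nil => exact absurd rfl hne
    | cons c2 t2 =>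
      intro hp
      have hc := (List.cons_prefix_cons.mp (by simpa using hp)).1
      have := h2 c2 (by simp)
      rw [← hc] at this
      simp [pvIsDig] at this
  | cons c1 t1 ih =>
    cases d2 with
    | nil =>
      intro hp
      have hc := (List.cons_prefix_cons.mp (by simpa using hp)).1
      have := h1 c1 (by simp)
      rw [hc] at this
      simp [pvIsDig] at this
    | cons c2 t2 =>
      intro hp
      obtain ⟨hc, hp'⟩ := List.cons_prefix_cons.mp (by simpa using hp)
      by_cases ht : t1 = t2
      · exact hne (by rw [hc, ht])
      · exact ih t2 (fun c hx => h1 c (by simp [hx])) (fun c hx => h2 c (by simp [hx])) ht hp'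

theorem pvPat_not_prefix (b1 b2 : Bool) (d1 d2 rest : List Char)
    (h1 : ∀ c ∈ d1, pvIsDig c = true) (h2 : ∀ c ∈ d2, pvIsDig c = true)
    (hne : ¬ (b1 = b2 ∧ d1 = d2)) :
    ¬ (pvPat b1 d1 <+: pvPat b2 d2 ++ rest) := by
  cases b1 <;> cases b2 <;> intro hp
  · exact pvDigitCore_not_prefix d1 d2 ['}'] ('}' :: rest) h1 h2
      (fun h => hne ⟨rfl, h⟩)
      (by simpa [pvPat, List.cons_prefix_cons, List.append_assoc] using hp)
  · simp [pvPat, List.cons_prefix_cons] at hp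
  · simp [pvPat, List.cons_prefix_cons] at hp
  · exact pvDigitCore_not_prefix d1 d2 ['}'] ('}' :: rest) h1 h2
      (fun h => hne ⟨rfl, h⟩)
      (by simpa [pvPat, List.cons_prefix_cons, List.append_assoc] using hp)

theorem pvPat_tail_nodollar (b : Bool) (d : List Char) (h : ∀ c ∈ d, pvIsDig c = true) :
    ∀ c ∈ (pvPat b d).tail, c ≠ '$' := by
  intro c hc heq
  subst heq
  cases b <;> simp [pvPat] at hc <;>
    · have := h '$' hc; simp [pvIsDig] at this

theorem pvRender_cons (f : Bool → List Char → List Char) (t : Char ⊕ Bool × List Char)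
    (ts : List (Char ⊕ Bool × List Char)) :
    pvRender f (t :: ts)
      = (match t with | Sum.inl c => [c] | Sum.inr p => f p.1 p.2) ++ pvRender f ts := by
  simp [pvRender]

theorem pvRender_head_ne (f : Bool → List Char → List Char)
    (ts : List (Char ⊕ Bool × List Char)) (hts : pvOkTs ts) (hf : pvOkF f)
    (hhd : ∀ c', ts.head? = some (Sum.inl c') → c' ≠ '{') :
    (pvRender f ts).head? ≠ some '{' := by
  cases ts with
  | nil => simp [pvRender]
  | cons t ts' =>
    cases t with
    | inl c =>
      have := hhd c (by simp)
      simp [pvRender_cons, this]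
    | inr p =>
      rcases hf p.1 p.2 with hfp | ⟨h1, h2, h3⟩
      · simp [pvRender_cons, hfp, pvPat]
      · simp only [pvRender_cons]
        cases hv : f p.1 p.2 with
        | nil => exact absurd hv h3
        | cons x xs =>
          have hx : x ≠ '{' := fun hc => h2 (by rw [hv, hc]; simp)
          simp [hx]

theorem pvPat_not_prefix_dollar (bq : Bool) (dq : List Char)
    (X : List Char) (hX : X.head? ≠ some '{') :
    ¬ (pvPat bq dq <+: '$' :: X) := by
  intro hp
  have h2 : '{' :: ((if bq = true then ['T','A','R','G','E','T','S'] else ['S','O','U','R','C','E','S']) ++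
      '[' :: (dq ++ [']', '}'])) <+: X := by
    simpa [pvPat] using hp
  cases X with
  | nil => simp at h2
  | cons x xs =>
    have hx := (List.cons_prefix_cons.mp h2).1
    exact hX (by rw [← hx]; rfl)

theorem pvReplace_render (ts : List (Char ⊕ Bool × List Char)) (f : Bool → List Char → List Char)
    (bq : Bool) (dq v : List Char) (hts : pvOkTs ts) (hch : List.IsChain pvChainP ts)
    (hf : pvOkF f) (hv : pvGoodVal v)
    (hdq : ∀ c ∈ dq, pvIsDig c = true) :
    pvMyRep (pvPat bq dq) v (pvRender f ts) =
      pvRender (fun b d => if b = bq ∧ d = dq ∧ f b d = pvPat b d then v else f b d) ts := by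
  revert hts hch
  induction ts with
  | nil => intro _ _; simp [pvRender, pvMyRep]
  | cons t ts ih =>
    intro hts hch
    have htl : pvOkTs ts := fun x hx => hts x (List.mem_cons_of_mem _ hx)
    have hctl : List.IsChain pvChainP ts := hch.tail
    have ihs := ih htl hctl
    cases t with
    | inl c =>
      simp only [pvRender_cons, List.singleton_append]
      by_cases hc : c = '$'
      · subst hc
        rw [pvMyRep, if_neg, ihs]
        intro hcon
        refine pvPat_not_prefix_dollar bq dq (pvRender f ts) ?_
          (List.isPrefixOf_iff_prefix.mp hcon.2)
        apply pvRender_head_ne f ts htl hf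
        intro c' hc'
        intro hceq
        subst hceq
        have hp := List.isChain_cons.mp hch
        cases ts with
        | nil => simp at hc'
        | cons t2 ts2 =>
          simp at hc'
          exact (hp.1 t2 (by simp)) ⟨rfl, by rw [hc']⟩
      · rw [pvMyRep, if_neg, ihs]
        intro hcon
        have := (List.cons_prefix_cons.mp (List.isPrefixOf_iff_prefix.mp hcon.2)).1
        exact hc this.symm
    | inr p =>
      obtain ⟨b, d⟩ := p
      have hok := hts (Sum.inr (b, d)) List.mem_cons_self
      simp only at hok
      obtain ⟨hdne, hddig⟩ := hok
      simp only [pvRender_cons]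
      have hpatne : pvPat bq dq ≠ [] := by simp [pvPat]
      rcases hf b d with hfp | hfd
      · by_cases heq : b = bq ∧ d = dq
        · obtain ⟨rfl, rfl⟩ := heq
          rw [hfp, pvMyRep_self _ _ _ hpatne, ihs, if_pos ⟨rfl, rfl, rfl⟩]
        · rw [hfp]
          have hnp : ¬ (pvPat bq dq <+: pvPat b d ++ (pvRender f ts)) :=
            pvPat_not_prefix bq b dq d _ hdq hddig (fun hcon => heq ⟨hcon.1.symm, hcon.2.symm⟩)
          have hstep : pvMyRep (pvPat bq dq) v (pvPat b d ++ pvRender f ts)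
              = pvPat b d ++ pvMyRep (pvPat bq dq) v (pvRender f ts) := by
            rw [show pvPat b d ++ pvRender f ts
                = '$' :: ((pvPat b d).tail ++ pvRender f ts) from rfl]
            rw [pvMyRep, if_neg (fun hcon => hnp (List.isPrefixOf_iff_prefix.mp hcon.2))]
            rw [pvMyRep_nodollar _ _ _ _ rfl (pvPat_tail_nodollar b d hddig)]
            rfl
          rw [hstep, ihs, if_neg (fun hcon => heq ⟨hcon.1, hcon.2.1⟩)]
      · have hstep : pvMyRep (pvPat bq dq) v (f b d ++ pvRender f ts)
            = f b d ++ pvMyRep (pvPat bq dq) v (pvRender f ts) :=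
          pvMyRep_nodollar _ _ _ _ rfl (fun c hc hc' => hfd.1 (hc' ▸ hc))
        have hne : f b d ≠ pvPat b d := by
          intro hcon
          exact hfd.1 (hcon ▸ (by simp [pvPat] : '$' ∈ pvPat b d))
        rw [hstep, ihs, if_neg (fun hcon => hne hcon.2.2)]

theorem pvRender_congr (f g : Bool → List Char → List Char) (ts : List (Char ⊕ Bool × List Char))
    (h : ∀ b d, Sum.inr (b, d) ∈ ts → f b d = g b d) : pvRender f ts = pvRender g ts := by
  induction ts with
  | nil => rfl
  | cons t ts ih =>
    have htail := ih (fun b d hm => h b d (List.mem_cons_of_mem _ hm))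
    cases t with
    | inl c => simp only [pvRender, List.flatMap_cons] at *; rw [htail]
    | inr p =>
      simp only [pvRender, List.flatMap_cons] at *
      rw [htail, h p.1 p.2 (by simp)]

-- digits lemmas
theorem pvDigitChar_digit (k : Nat) (h : k < 10) : pvIsDig (Nat.digitChar k) = true := by
  interval_cases k <;> decide

theorem pvDigitChar_val (k : Nat) (h : k < 10) : (Nat.digitChar k).toNat - 48 = k := by
  interval_cases k <;> decide

theorem pvDigitChar_ne_zero (k : Nat) (h1 : 1 ≤ k) (h2 : k < 10) : Nat.digitChar k ≠ '0' := by
  interval_cases k <;> decide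

theorem pvDig_toNat_bounds (c : Char) (h : pvIsDig c = true) : 48 ≤ c.toNat ∧ c.toNat ≤ 57 := by
  simp only [pvIsDig, decide_eq_true_eq, Char.le_def, UInt32.le_iff_toNat_le] at h
  exact h

theorem pvDigitChar_inv (c : Char) (h : pvIsDig c = true) :
    Nat.digitChar (c.toNat - 48) = c := by
  obtain ⟨h1, h2⟩ := pvDig_toNat_bounds c h
  have hofn : Char.ofNat c.toNat = c := Char.ofNat_toNat c
  interval_cases hm : c.toNat <;> rw [← hofn] <;> decide

theorem pvDig_ne_nil (n : Nat) : pvDig n ≠ [] := by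
  rw [pvDig]; split <;> simp

theorem pvDig_all_digit (n : Nat) : ∀ c ∈ pvDig n, pvIsDig c = true := by
  induction n using pvDig.induct with
  | case1 n h =>
    rw [pvDig, dif_pos h]
    intro c hc
    simp at hc
    subst hc
    exact pvDigitChar_digit n h
  | case2 n h ih =>
    rw [pvDig, dif_neg h]
    intro c hc
    rcases List.mem_append.mp hc with hm | hm
    · exact ih c hm
    · simp at hm
      subst hm
      exact pvDigitChar_digit _ (Nat.mod_lt _ (by omega))

theorem pvVal_append_singleton (xs : List Char) (c : Char) :
    pvVal (xs ++ [c]) = 10 * pvVal xs + (c.toNat - 48) := by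
  simp [pvVal, List.foldl_append]

theorem pvDig_val (n : Nat) : pvVal (pvDig n) = n := by
  induction n using pvDig.induct with
  | case1 n h =>
    rw [pvDig, dif_pos h]
    simp [pvVal, pvDigitChar_val n h]
  | case2 n h ih =>
    rw [pvDig, dif_neg h, pvVal_append_singleton, ih,
      pvDigitChar_val _ (Nat.mod_lt _ (by omega))]
    omega

theorem pvDig_head_ne_zero (n : Nat) (hn : n ≠ 0) : (pvDig n).head? ≠ some '0' := by
  induction n using pvDig.induct with
  | case1 n h =>
    rw [pvDig, dif_pos h]
    simpa using pvDigitChar_ne_zero n (by omega) h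
  | case2 n h ih =>
    rw [pvDig, dif_neg h]
    rw [List.head?_append_of_ne_nil _ (pvDig_ne_nil _)]
    exact ih (by omega)

theorem pvDig_canon (n : Nat) : (pvDig n).length = 1 ∨ (pvDig n).head? ≠ some '0' := by
  by_cases hn : n = 0
  · subst hn; left; rw [pvDig]; rfl
  · exact Or.inr (pvDig_head_ne_zero n hn)

theorem pvVal_le_start (t : List Char) : ∀ a : Nat, a ≤ t.foldl (fun a c => 10 * a + (c.toNat - 48)) a := by
  induction t with
  | nil => intro a; simp
  | cons c t ih =>
    intro a
    calc a ≤ 10 * a + (c.toNat - 48) := by omega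
    _ ≤ _ := ih _

theorem pvVal_pos (h : Char) (t : List Char) (hdig : pvIsDig h = true) (hh : h ≠ '0') :
    1 ≤ pvVal (h :: t) := by
  have hb := pvDig_toNat_bounds h hdig
  have h48 : h.toNat ≠ 48 := by
    intro hc
    apply hh
    rw [← Char.ofNat_toNat h, hc]
    try rfl
  have : 1 ≤ h.toNat - 48 := by omega
  calc 1 ≤ h.toNat - 48 := this
  _ ≤ _ := by simpa [pvVal] using pvVal_le_start t (h.toNat - 48)

theorem pvDig_of_canon (d : List Char) (hd : d ≠ []) (hdig : ∀ c ∈ d, pvIsDig c = true)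
    (hc : d.length = 1 ∨ d.head? ≠ some '0') : pvDig (pvVal d) = d := by
  induction d using List.reverseRecOn with
  | nil => exact absurd rfl hd
  | append_singleton xs c ih =>
    have hcd : pvIsDig c = true := hdig c (by simp)
    have hcb := pvDig_toNat_bounds c hcd
    rw [pvVal_append_singleton]
    cases xs with
    | nil =>
      simp only [pvVal, List.foldl_nil, Nat.mul_zero, Nat.zero_add]
      rw [pvDig, dif_pos (by omega)]
      rw [pvDigitChar_inv c hcd]
      simp
    | cons h t =>
      have hh : h ≠ '0' := by
        rcases hc with hlen | hhd
        · simp at hlen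
        · intro hc0; apply hhd; subst hc0; simp
      have hdx : ∀ x ∈ h :: t, pvIsDig x = true := fun x hx => hdig x (by simp at hx ⊢; tauto)
      have hv1 : 1 ≤ pvVal (h :: t) := pvVal_pos h t (hdx h (by simp)) hh
      have hih : pvDig (pvVal (h :: t)) = h :: t :=
        ih (by simp) hdx (Or.inr (by simpa using hh))
      rw [pvDig, dif_neg (by omega)]
      have hdiv : (10 * pvVal (h :: t) + (c.toNat - 48)) / 10 = pvVal (h :: t) := by omega
      have hmod : (10 * pvVal (h :: t) + (c.toNat - 48)) % 10 = c.toNat - 48 := by omega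
      rw [hdiv, hmod, hih, pvDigitChar_inv c hcd]

theorem pvCore_eq (fuel n : Nat) (acc : List Char) (h : n < fuel) :
    Nat.toDigitsCore 10 fuel n acc = pvDig n ++ acc := by
  induction fuel generalizing n acc with
  | zero => omega
  | succ f ih =>
    rw [Nat.toDigitsCore.eq_def]
    by_cases h10 : n / 10 = 0
    · simp only [h10, if_true]
      rw [pvDig, dif_pos (by omega)]
      have : n % 10 = n := by omega
      rw [this]
      rfl
    · simp only [h10, if_false]
      have hlt : n / 10 < n := Nat.div_lt_self (by omega) (by omega)
      rw [ih (n / 10) _ (by omega)]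
      conv_rhs => rw [pvDig, dif_neg (by omega : ¬ n < 10)]
      simp

theorem pvToChars_eq (k : Nat) : PySem.Int.toChars (k : Int) = pvDig k := by
  unfold PySem.Int.toChars
  rw [if_neg (by omega)]
  have : ((k : Int)).toNat = k := by omega
  rw [this]
  unfold Nat.toDigits
  simpa using pvCore_eq (k + 1) k [] (by omega)

theorem pvExists_iff (d : List Char) (n : Nat) (hd : d ≠ []) (hdig : ∀ c ∈ d, pvIsDig c = true) :
    (∃ j : Nat, j < n ∧ pvDig j = d) ↔ ((d.length = 1 ∨ d.head? ≠ some '0') ∧ pvVal d < n) := by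
  constructor
  · rintro ⟨j, hj, rfl⟩
    exact ⟨pvDig_canon j, by rw [pvDig_val]; exact hj⟩
  · rintro ⟨hc, hv⟩
    exact ⟨pvVal d, hv, pvDig_of_canon d hd hdig hc⟩

-- tokenization of a Pre_-admissible cmd
theorem pvParse (name cs : List Char)
    (htag : (('$' :: '{' :: (name ++ ['['])).isPrefixOf cs) = true)
    (hne : ((cs.drop ('$' :: '{' :: (name ++ ['['])).length).takeWhile pvIsDig).isEmpty = false)
    (hbr : ([']','}'].isPrefixOf ((cs.drop ('$' :: '{' :: (name ++ ['['])).length).drop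
      ((cs.drop ('$' :: '{' :: (name ++ ['['])).length).takeWhile pvIsDig).length)) = true) :
    ∃ d rest, d = (cs.drop ('$' :: '{' :: (name ++ ['['])).length).takeWhile pvIsDig ∧
      d ≠ [] ∧ (∀ c ∈ d, pvIsDig c = true) ∧
      cs = ('$' :: '{' :: (name ++ ['['])) ++ (d ++ ']' :: '}' :: rest) := by
  obtain ⟨r, hr⟩ := List.isPrefixOf_iff_prefix.mp htag
  have hdrop : cs.drop ('$' :: '{' :: (name ++ ['['])).length = r := by
    rw [← hr]; exact List.drop_left
  rw [hdrop] at hne hbr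
  obtain ⟨rest, hrest⟩ := List.isPrefixOf_iff_prefix.mp hbr
  refine ⟨r.takeWhile pvIsDig, rest, by rw [hdrop], by simpa using hne,
    fun c hc => List.mem_takeWhile_imp hc, ?_⟩
  rw [← hr]
  congr 1
  rw [pvDrop_takeWhile] at hrest
  conv_lhs => rw [← List.takeWhile_append_dropWhile (p := pvIsDig) (l := r), ← hrest]
  simp

theorem pvTokenize (cs : List Char)
    (h : ∀ u ∈ cs.tails, u.take 2 = ['$', '{'] → pvOkDollar u = true) :
    ∃ ts, pvOkTs ts ∧ List.IsChain pvChainP ts ∧ cs = pvRender pvPat ts ∧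
      (∀ c', ts.head? = some (Sum.inl c') → cs.head? = some c') := by
  generalize hn : cs.length = n
  induction n using Nat.strong_induction_on generalizing cs with
  | _ n ih =>
  subst hn
  cases hcs : cs with
  | nil => exact ⟨[], by simp [pvOkTs], by simp, by simp [pvRender], by simp⟩
  | cons c t =>
    subst hcs
    by_cases hc2 : c = '$' ∧ t.head? = some '{'
    · obtain ⟨rfl, ht⟩ := hc2
      have hok : pvOkDollar ('$' :: t) = true := by
        apply h ('$' :: t) (by simp [List.mem_tails])
        cases t with
        | nil => simp at ht
        | cons x xs => simp at ht; simp [ht]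
      simp only [pvOkDollar, List.any_cons, List.any_nil, Bool.or_false, Bool.or_eq_true,
        Bool.and_eq_true] at hok
      have hmain : ∃ b : Bool, ∃ d rest, d ≠ [] ∧ (∀ x ∈ d, pvIsDig x = true) ∧
          '$' :: t = pvPat b d ++ rest := by
        rcases hok with ⟨htag, hne, hbr⟩ | ⟨htag, hne, hbr⟩
        · obtain ⟨d, rest, -, hd, hdig, heq⟩ := pvParse ['T','A','R','G','E','T','S'] ('$' :: t)
            htag (by simpa using hne) hbr
          exact ⟨true, d, rest, hd, hdig, by rw [heq]; simp [pvPat]⟩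
        · obtain ⟨d, rest, -, hd, hdig, heq⟩ := pvParse ['S','O','U','R','C','E','S'] ('$' :: t)
            htag (by simpa using hne) hbr
          exact ⟨false, d, rest, hd, hdig, by rw [heq]; simp [pvPat]⟩
      obtain ⟨b, d, rest, hd, hdig, heq⟩ := hmain
      have hlen : rest.length < ('$' :: t).length := by
        rw [heq]; simp [pvPat]; omega
      have hrest : ∀ u ∈ rest.tails, u.take 2 = ['$', '{'] → pvOkDollar u = true := by
        intro u hu hh
        apply h u _ hh
        rw [List.mem_tails] at *
        exact hu.trans ⟨pvPat b d, heq.symm⟩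
      obtain ⟨ts, hts, hcts, hren, _⟩ := ih rest.length hlen rest hrest rfl
      refine ⟨Sum.inr (b, d) :: ts, ?_, ?_, ?_, by simp⟩
      · intro x hx
        rcases List.mem_cons.mp hx with rfl | hx'
        · exact ⟨hd, hdig⟩
        · exact hts x hx'
      · exact List.isChain_cons.mpr ⟨fun t2 _ => by simp [pvChainP], hcts⟩
      · rw [heq, pvRender_cons, hren]
    · have htl : ∀ u ∈ t.tails, u.take 2 = ['$', '{'] → pvOkDollar u = true := by
        intro u hu hh
        apply h u _ hh
        rw [List.mem_tails] at *
        exact hu.trans (List.suffix_cons c t)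
      obtain ⟨ts, hts, hcts, hren, hhd⟩ := ih t.length (by simp) t htl rfl
      refine ⟨Sum.inl c :: ts, ?_, ?_, ?_, by simp⟩
      · intro x hx
        rcases List.mem_cons.mp hx with rfl | hx'
        · trivial
        · exact hts x hx'
      · refine List.isChain_cons.mpr ⟨?_, hcts⟩
        intro t2 ht2
        rintro ⟨hceq, rfl⟩
        have hcd : c = '$' := by simpa using hceq
        have h7 := hhd '{' (Option.mem_def.mp ht2)
        exact hc2 ⟨hcd, h7⟩
      · rw [pvRender_cons, ← hren]
        rfl

-- header/key bridges
theorem pvHdr_targets (k : Int) (hk : 0 ≤ k) :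
    ("${TARGETS[" ++ PySem.Int.toStr k ++ "]}").toList = pvPat true (pvDig k.toNat) := by
  have h1 : (PySem.Int.toStr k).toList = pvDig k.toNat := by
    have h2 := pvToChars_eq k.toNat
    rw [Int.toNat_of_nonneg hk] at h2
    rw [PySem.Int.toList_toStr, h2]
  simp only [String.toList_append, h1]
  rw [show ("${TARGETS[" : String).toList = ['$','{','T','A','R','G','E','T','S','['] from rfl,
    show ("]}" : String).toList = [']','}'] from rfl]
  simp [pvPat]

theorem pvHdr_sources (k : Int) (hk : 0 ≤ k) :
    ("${SOURCES[" ++ PySem.Int.toStr k ++ "]}").toList = pvPat false (pvDig k.toNat) := by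
  have h1 : (PySem.Int.toStr k).toList = pvDig k.toNat := by
    have h2 := pvToChars_eq k.toNat
    rw [Int.toNat_of_nonneg hk] at h2
    rw [PySem.Int.toList_toStr, h2]
  simp only [String.toList_append, h1]
  rw [show ("${SOURCES[" : String).toList = ['$','{','S','O','U','R','C','E','S','['] from rfl,
    show ("]}" : String).toList = [']','}'] from rfl]
  simp [pvPat]

theorem pvKeyT_eq (j : Nat) : pvKeyT (j : Int) = pvPat true (pvDig j) := by
  have := pvHdr_targets (j : Int) (by positivity)
  simpa [pvKeyT] using this

theorem pvKeyS_eq (j : Nat) : pvKeyS (j : Int) = pvPat false (pvDig j) := by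
  have := pvHdr_sources (j : Int) (by positivity)
  simpa [pvKeyS] using this

theorem pvPat_inj (b1 b2 : Bool) (d1 d2 : List Char) (h : pvPat b1 d1 = pvPat b2 d2) :
    b1 = b2 ∧ d1 = d2 := by
  have hcore : ∀ (nm : List Char) (x y : List Char),
      ('$' :: '{' :: (nm ++ '[' :: x ++ [']', '}'])) = ('$' :: '{' :: (nm ++ '[' :: y ++ [']', '}']))
        → x = y := by
    intro nm x y hxy
    simpa using hxy
  cases b1 <;> cases b2 <;> simp only [pvPat, if_true, if_false, Bool.false_eq_true] at h
  · exact ⟨rfl, hcore _ _ _ h⟩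
  · exfalso; simp at h
  · exfalso; simp at h
  · exact ⟨rfl, hcore _ _ _ h⟩

theorem pvDig_inj (a b : Nat) (h : pvDig a = pvDig b) : a = b := by
  have := pvDig_val a
  rw [h, pvDig_val] at this
  omega

-- ===== dict lookup characterization =====
theorem pvFoldGet_not (key : Int → List Char) (files : List String) (s : Int)
    (d0 : PySem.Dict (List Char) (List Char)) (kq : List Char)
    (h : ∀ j : Nat, j < files.length → kq ≠ key (s + j)) :
    ((PySem.List.enumerate files s).foldl (fun d p => d.insert (key p.1) p.2.toList) d0).get? kq
      = d0.get? kq := by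
  induction files generalizing s d0 with
  | nil => simp [PySem.List.enumerate_nil]
  | cons f fs ih =>
    rw [PySem.List.enumerate_cons, List.foldl_cons]
    rw [ih (s + 1) _ (fun j hj => by
      have hlt : j + 1 < (f :: fs).length := by simp only [List.length_cons]; omega
      have := h (j + 1) hlt
      rw [show s + ((j + 1 : Nat) : Int) = s + 1 + (j : Int) by push_cast; ring] at this
      exact this)]
    exact PySem.Dict.get?_insert_of_ne _ _ (by simpa using h 0 (by simp))

theorem pvFoldGet_hit (key : Int → List Char) (files : List String) (s : Int)
    (d0 : PySem.Dict (List Char) (List Char)) (j : Nat) (hj : j < files.length)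
    (hinj : ∀ a b : Nat, a < files.length → b < files.length → key (s + a) = key (s + b) → a = b) :
    ((PySem.List.enumerate files s).foldl (fun d p => d.insert (key p.1) p.2.toList) d0).get?
        (key (s + j)) = some (files[j].toList) := by
  induction files generalizing s d0 j with
  | nil => simp at hj
  | cons f fs ih =>
    rw [PySem.List.enumerate_cons, List.foldl_cons]
    cases j with
    | zero =>
      rw [pvFoldGet_not key fs (s + 1) _ _ (fun m hm hc => by
        have hm1 : m + 1 < (f :: fs).length := by simp only [List.length_cons]; omega
        have h0 : (0 : Nat) = m + 1 := hinj 0 (m + 1) (by simp) hm1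
          (by rw [show s + ((m + 1 : Nat) : Int) = s + 1 + (m : Int) by push_cast; ring]
              exact hc)
        omega)]
      rw [show s + ((0 : Nat) : Int) = s by simp]
      rw [PySem.Dict.get?_insert_self]
      simp
    | succ m =>
      have hm : m < fs.length := by simp only [List.length_cons] at hj; omega
      rw [show s + ((m + 1 : Nat) : Int) = s + 1 + (m : Int) by push_cast; ring]
      rw [ih (s + 1) _ m hm (fun a b ha hb hc => by
        have ha1 : a + 1 < (f :: fs).length := by simp only [List.length_cons]; omega
        have hb1 : b + 1 < (f :: fs).length := by simp only [List.length_cons]; omega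
        have := hinj (a + 1) (b + 1) ha1 hb1
          (by rw [show s + ((a + 1 : Nat) : Int) = s + 1 + (a : Int) by push_cast; ring,
                show s + ((b + 1 : Nat) : Int) = s + 1 + (b : Int) by push_cast; ring]
              exact hc)
        omega)]
      simp

theorem pvFoldGet_inv (key : Int → List Char) (files : List String) (s : Int)
    (d0 : PySem.Dict (List Char) (List Char)) (kq v : List Char)
    (h : ((PySem.List.enumerate files s).foldl (fun d p => d.insert (key p.1) p.2.toList) d0).get? kq
      = some v) :
    d0.get? kq = some v ∨ ∃ (j : Nat) (_ : j < files.length), kq = key (s + j) ∧ v = files[j].toList := by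
  induction files generalizing s d0 with
  | nil => left; simpa [PySem.List.enumerate_nil] using h
  | cons f fs ih =>
    rw [PySem.List.enumerate_cons, List.foldl_cons] at h
    rcases ih (s + 1) _ h with h1 | ⟨j, hj, hk, hv⟩
    · by_cases hkq : kq = key s
      · subst hkq
        rw [PySem.Dict.get?_insert_self] at h1
        right
        refine ⟨0, by simp, by simp, ?_⟩
        simpa using h1.symm
      · left
        rwa [PySem.Dict.get?_insert_of_ne _ _ hkq] at h1
    · right
      have hj1 : j + 1 < (f :: fs).length := by simp only [List.length_cons]; omega
      refine ⟨j + 1, hj1, ?_, ?_⟩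
      · rw [show s + ((j + 1 : Nat) : Int) = s + 1 + (j : Int) by push_cast; ring]; exact hk
      · simpa using hv

theorem pvKeyT_inj (a b : Nat) (h : pvKeyT ((0 : Int) + a) = pvKeyT ((0 : Int) + b)) : a = b := by
  rw [show (0 : Int) + (a : Int) = (a : Int) by ring, show (0 : Int) + (b : Int) = (b : Int) by ring,
    pvKeyT_eq, pvKeyT_eq] at h
  exact pvDig_inj a b (pvPat_inj _ _ _ _ h).2

theorem pvKeyS_inj (a b : Nat) (h : pvKeyS ((0 : Int) + a) = pvKeyS ((0 : Int) + b)) : a = b := by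
  rw [show (0 : Int) + (a : Int) = (a : Int) by ring, show (0 : Int) + (b : Int) = (b : Int) by ring,
    pvKeyS_eq, pvKeyS_eq] at h
  exact pvDig_inj a b (pvPat_inj _ _ _ _ h).2

theorem pvPat_ne_keyT (d : List Char) (hdig : ∀ c ∈ d, pvIsDig c = true) (j : Nat)
    (hnot : ¬ ((d.length = 1 ∨ d.head? ≠ some '0') ∧ pvVal d < j + 1)) :
    pvPat true d ≠ pvKeyT ((0 : Int) + j) := by
  rw [show (0 : Int) + (j : Int) = (j : Int) by ring, pvKeyT_eq]
  intro hc
  have hd := (pvPat_inj _ _ _ _ hc).2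
  apply hnot
  rw [hd]
  exact ⟨pvDig_canon j, by rw [pvDig_val]; omega⟩

theorem pvPat_ne_keyS (d : List Char) (hdig : ∀ c ∈ d, pvIsDig c = true) (j : Nat)
    (hnot : ¬ ((d.length = 1 ∨ d.head? ≠ some '0') ∧ pvVal d < j + 1)) :
    pvPat false d ≠ pvKeyS ((0 : Int) + j) := by
  rw [show (0 : Int) + (j : Int) = (j : Int) by ring, pvKeyS_eq]
  intro hc
  have hd := (pvPat_inj _ _ _ _ hc).2
  apply hnot
  rw [hd]
  exact ⟨pvDig_canon j, by rw [pvDig_val]; omega⟩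

theorem pvSubs_get_pat (o i : List String) (b : Bool) (d : List Char)
    (hd : d ≠ []) (hdig : ∀ c ∈ d, pvIsDig c = true) :
    (pvSubs o i).get? (pvPat b d) =
      if (d.length = 1 ∨ d.head? ≠ some '0') ∧ pvVal d < (if b then o else i).length then
        some ((PySem.List.pyGetD (if b then o else i) (pvVal d : Int) "").toList)
      else none := by
  have hTneS : ∀ d1 d2, pvPat true d1 ≠ pvPat false d2 := by
    intro d1 d2 hc
    exact absurd (pvPat_inj _ _ _ _ hc).1 (by simp)
  cases b
  · -- SOURCES: lookup happens in the outer (sources) fold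
    simp only [if_false, Bool.false_eq_true]
    by_cases hcond : (d.length = 1 ∨ d.head? ≠ some '0') ∧ pvVal d < i.length
    · rw [if_pos hcond]
      have hkey : pvPat false d = pvKeyS ((0 : Int) + (pvVal d : Nat)) := by
        rw [show (0 : Int) + ((pvVal d : Nat) : Int) = ((pvVal d : Nat) : Int) by ring, pvKeyS_eq,
          pvDig_of_canon d hd hdig hcond.1]
      unfold pvSubs
      rw [hkey, pvFoldGet_hit pvKeyS i 0 _ (pvVal d) hcond.2 (fun a b _ _ => pvKeyS_inj a b)]
      rw [PySem.List.pyGetD_eq_getElem i "" (by positivity) (by exact_mod_cast hcond.2)]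
      simp
    · rw [if_neg hcond]
      cases hg : (pvSubs o i).get? (pvPat false d) with
      | none => rfl
      | some v =>
        exfalso
        unfold pvSubs at hg
        rcases pvFoldGet_inv pvKeyS i 0 _ _ _ hg with h1 | ⟨j, hj, hk, -⟩
        · rcases pvFoldGet_inv pvKeyT o 0 _ _ _ h1 with h2 | ⟨j, hj, hk, -⟩
          · simp [PySem.Dict.get?_empty] at h2
          · rw [show (0 : Int) + (j : Int) = (j : Int) by ring, pvKeyT_eq] at hk
            exact hTneS (pvDig j) d hk.symm
        · exact pvPat_ne_keyS d hdig j (fun hc => hcond ⟨hc.1, by omega⟩) hk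
  · -- TARGETS: sources fold leaves the key alone, lookup in targets fold
    simp only [if_true]
    unfold pvSubs
    rw [pvFoldGet_not pvKeyS i 0 _ _ (fun j hj hc => by
      rw [show (0 : Int) + (j : Int) = (j : Int) by ring, pvKeyS_eq] at hc
      exact hTneS d (pvDig j) hc)]
    by_cases hcond : (d.length = 1 ∨ d.head? ≠ some '0') ∧ pvVal d < o.length
    · rw [if_pos hcond]
      have hkey : pvPat true d = pvKeyT ((0 : Int) + (pvVal d : Nat)) := by
        rw [show (0 : Int) + ((pvVal d : Nat) : Int) = ((pvVal d : Nat) : Int) by ring, pvKeyT_eq,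
          pvDig_of_canon d hd hdig hcond.1]
      rw [hkey, pvFoldGet_hit pvKeyT o 0 _ (pvVal d) hcond.2 (fun a b _ _ => pvKeyT_inj a b)]
      rw [PySem.List.pyGetD_eq_getElem o "" (by positivity) (by exact_mod_cast hcond.2)]
      simp
    · rw [if_neg hcond]
      cases hg : ((PySem.List.enumerate o).foldl
          (fun d' p => d'.insert (pvKeyT p.1) p.2.toList) PySem.Dict.empty).get? (pvPat true d) with
      | none => rfl
      | some v =>
        exfalso
        rcases pvFoldGet_inv pvKeyT o 0 _ _ _ hg with h2 | ⟨j, hj, hk, -⟩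
        · simp [PySem.Dict.get?_empty] at h2
        · exact pvPat_ne_keyT d hdig j (fun hc => hcond ⟨hc.1, by omega⟩) hk

theorem pvSubs_get_some (o i : List String) (kq v : List Char)
    (h : (pvSubs o i).get? kq = some v) :
    (∃ j : Nat, j < o.length ∧ kq = pvPat true (pvDig j)) ∨
      (∃ j : Nat, j < i.length ∧ kq = pvPat false (pvDig j)) := by
  unfold pvSubs at h
  rcases pvFoldGet_inv pvKeyS i 0 _ _ _ h with h1 | ⟨j, hj, hk, -⟩
  · rcases pvFoldGet_inv pvKeyT o 0 _ _ _ h1 with h2 | ⟨j, hj, hk, -⟩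
    · simp [PySem.Dict.get?_empty] at h2
    · left
      exact ⟨j, hj, by rwa [show (0 : Int) + (j : Int) = (j : Int) by ring, pvKeyT_eq] at hk⟩
  · right
    exact ⟨j, hj, by rwa [show (0 : Int) + (j : Int) = (j : Int) by ring, pvKeyS_eq] at hk⟩

-- ===== scanner evaluation =====
theorem pvTakeWhile_all (p : Char → Bool) (w : List Char) (x : Char) (r : List Char)
    (hw : ∀ c ∈ w, p c = true) (hx : p x = false) : (w ++ x :: r).takeWhile p = w := by
  induction w with
  | nil => simp [List.takeWhile_cons, hx]
  | cons c t ih =>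
    rw [List.cons_append, List.takeWhile_cons, hw c (by simp), ih (fun c hc => hw c (by simp [hc]))]
    simp

theorem pvScan_none_head (subs : PySem.Dict (List Char) (List Char)) (c : Char) (t : List Char)
    (hc : c ≠ '$') : pvScan subs (c :: t) = c :: pvScan subs t := by
  rw [pvScan, dif_neg]
  rintro ⟨h1, -, -⟩
  exact hc ((List.cons_prefix_cons.mp (List.isPrefixOf_iff_prefix.mp h1)).1).symm

theorem pvScan_none_dollar (subs : PySem.Dict (List Char) (List Char)) (X : List Char)
    (hX : X.head? ≠ some '{') : pvScan subs ('$' :: X) = '$' :: pvScan subs X := by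
  rw [pvScan, dif_neg]
  rintro ⟨h1, -, -⟩
  have h := (List.cons_prefix_cons.mp (List.isPrefixOf_iff_prefix.mp h1)).2
  cases X with
  | nil => simp at h
  | cons x xs => exact hX (by rw [(List.cons_prefix_cons.mp h).1]; rfl)

theorem pvScan_nodollar (subs : PySem.Dict (List Char) (List Char)) (w rest : List Char)
    (hw : ∀ c ∈ w, c ≠ '$') : pvScan subs (w ++ rest) = w ++ pvScan subs rest := by
  induction w with
  | nil => simp
  | cons c t ih =>
    rw [List.cons_append, pvScan_none_head subs c _ (hw c (by simp)),
      ih (fun x hx => hw x (by simp [hx]))]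
    simp

theorem pvScan_pat (subs : PySem.Dict (List Char) (List Char)) (b : Bool) (d rest : List Char)
    (hd : d ≠ []) (hdig : ∀ c ∈ d, pvIsDig c = true) :
    pvScan subs (pvPat b d ++ rest) =
      match subs.get? (pvPat b d) with
      | some v => v ++ pvScan subs rest
      | none => pvPat b d ++ pvScan subs rest := by
  have hsplit : pvPat b d ++ rest
      = '$' :: (('{' :: ((if b then ['T','A','R','G','E','T','S'] else ['S','O','U','R','C','E','S']) ++ '[' :: d ++ [']'])) ++ '}' :: rest) := by
    cases b <;> simp [pvPat]
  set W : List Char :=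
    '{' :: ((if b then ['T','A','R','G','E','T','S'] else ['S','O','U','R','C','E','S']) ++ '[' :: d ++ [']']) with hW
  have hnb : ∀ c ∈ '$' :: W, (c != '}') = true := by
    intro c hc
    simp only [bne_iff_ne, ne_eq]
    intro hc2
    subst hc2
    rw [hW] at hc
    cases b <;> simp at hc <;>
      · have := hdig _ hc; simp [pvIsDig] at this
  have htw2 : ('$' :: (W ++ '}' :: rest)).takeWhile (fun x => x != '}') = '$' :: W := by
    have h := pvTakeWhile_all (fun x => x != '}') ('$' :: W) '}' rest hnb (by simp)
    simpa using h
  have hkey2 : ('$' :: W) ++ ['}'] = pvPat b d := by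
    rw [hW]; cases b <;> simp [pvPat]
  have hdrop2 : ('$' :: (W ++ '}' :: rest)).drop (('$' :: W).length + 1) = rest := by
    have he : ('$' :: (W ++ '}' :: rest)) = (('$' :: W) ++ ['}']) ++ rest := by simp
    rw [he, show ('$' :: W).length + 1 = (('$' :: W) ++ ['}']).length by simp]
    exact List.drop_left
  have hpre2 : (['$', '{'].isPrefixOf ('$' :: (W ++ '}' :: rest))) = true := by
    rw [hW]
    simp [List.isPrefixOf]
  rw [hsplit]
  cases hget : subs.get? (pvPat b d) with
  | some v =>
    rw [pvScan, dif_pos ⟨hpre2, by rw [htw2]; simp, by rw [htw2, hkey2, hget]; rfl⟩]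
    simp only [htw2, hkey2, hget, hdrop2, Option.get_some]
  | none =>
    rw [pvScan, dif_neg]
    · have htail : W ++ '}' :: rest = ((pvPat b d).tail) ++ rest := by
        rw [hW]; cases b <;> simp [pvPat]
      rw [htail, pvScan_nodollar subs _ _ (pvPat_tail_nodollar b d hdig)]
      have hh : pvPat b d = '$' :: (pvPat b d).tail := by cases b <;> simp [pvPat]
      rw [hh]
      simp
    · rintro ⟨-, -, h3⟩
      rw [htw2, hkey2, hget] at h3
      simp at h3

theorem pvScan_render (o i : List String) (ts : List (Char ⊕ Bool × List Char))
    (hts : pvOkTs ts) (hch : List.IsChain pvChainP ts) :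
    pvScan (pvSubs o i) (pvRender pvPat ts) = pvRender (pvStar o i) ts := by
  revert hts hch
  induction ts with
  | nil => intro _ _; simp [pvRender, pvScan]
  | cons t ts ih =>
    intro hts hch
    have htl : pvOkTs ts := fun x hx => hts x (List.mem_cons_of_mem _ hx)
    have hctl : List.IsChain pvChainP ts := hch.tail
    have ihs := ih htl hctl
    cases t with
    | inl c =>
      simp only [pvRender_cons, List.singleton_append]
      by_cases hc : c = '$'
      · subst hc
        have hhead : (pvRender pvPat ts).head? ≠ some '{' := by
          apply pvRender_head_ne pvPat ts htl (fun b d => Or.inl rfl)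
          intro c' hc' hceq
          subst hceq
          have hp := List.isChain_cons.mp hch
          cases ts with
          | nil => simp at hc'
          | cons t2 ts2 =>
            simp at hc'
            exact (hp.1 t2 (by simp)) ⟨rfl, by rw [hc']⟩
        rw [pvScan_none_dollar _ _ hhead, ihs]
      · rw [pvScan_none_head _ _ _ hc, ihs]
    | inr p =>
      obtain ⟨b, d⟩ := p
      have hok := hts (Sum.inr (b, d)) List.mem_cons_self
      simp only at hok
      obtain ⟨hdne, hdig⟩ := hok
      simp only [pvRender_cons]
      rw [pvScan_pat _ b d _ hdne hdig, pvSubs_get_pat o i b d hdne hdig]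
      by_cases hcond : (d.length = 1 ∨ d.head? ≠ some '0') ∧ pvVal d < (if b then o else i).length
      · rw [if_pos hcond]
        simp only [pvStar, if_pos hcond, ihs]
      · rw [if_neg hcond]
        simp only [pvStar, if_neg hcond, ihs]

-- head of dropWhile fails the predicate
theorem pvDropWhile_head (p : Char → Bool) (l : List Char) (x : Char) (xs : List Char)
    (h : l.dropWhile p = x :: xs) : p x = false := by
  induction l with
  | nil => simp at h
  | cons c t ih =>
    rw [List.dropWhile_cons] at h
    by_cases hp : p c
    · rw [if_pos hp] at h; exact ih h
    · rw [if_neg hp] at h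
      have hcx : c = x := (List.cons.inj h).1
      rw [← hcx]
      simpa using hp

-- the no-placeholder branch
theorem pvMyRep_id (old new s : List Char) (h : ¬ old <:+: s) :
    pvMyRep old new s = s := by
  induction s with
  | nil => simp [pvMyRep]
  | cons c t ih =>
    rw [pvMyRep, if_neg (fun hc => h ((List.isPrefixOf_iff_prefix.mp hc.2).isInfix)),
      ih (fun hc => h (hc.trans (List.suffix_cons c t).isInfix))]

theorem pvScan_id (o i : List String) (cs : List Char)
    (h : (∀ j < o.length, ¬ pvPat true (pvDig j) <:+: cs) ∧
         (∀ j < i.length, ¬ pvPat false (pvDig j) <:+: cs)) :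
    pvScan (pvSubs o i) cs = cs := by
  induction cs with
  | nil => simp [pvScan]
  | cons c t ih =>
    have hstep : pvScan (pvSubs o i) (c :: t) = c :: pvScan (pvSubs o i) t := by
      rw [pvScan, dif_neg]
      rintro ⟨-, hlen, hsome⟩
      obtain ⟨v, hv⟩ := Option.isSome_iff_exists.mp hsome
      -- the found key is a prefix of c :: t, hence an infix of cs
      have hpre : ((c :: t).takeWhile (fun x => x != '}') ++ ['}']) <+: (c :: t) := by
        have hsplitl := List.takeWhile_append_dropWhile (p := fun x => x != '}') (l := c :: t)
        cases hdw : (c :: t).dropWhile (fun x => x != '}') with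
        | nil =>
          exfalso
          rw [hdw] at hsplitl
          have : ((c :: t).takeWhile (fun x => x != '}')).length = (c :: t).length := by
            conv_rhs => rw [← hsplitl]
            simp
          omega
        | cons x xs =>
          have hx : x = '}' := by
            have := pvDropWhile_head _ _ _ _ hdw
            simpa using this
          subst hx
          refine ⟨xs, ?_⟩
          conv_rhs => rw [← hsplitl, hdw]
          simp
      rcases pvSubs_get_some o i _ v hv with ⟨j, hj, hk⟩ | ⟨j, hj, hk⟩
      · exact h.1 j hj (hk ▸ hpre.isInfix)
      · exact h.2 j hj (hk ▸ hpre.isInfix)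
    rw [hstep, ih ⟨fun j hj hc => h.1 j hj (hc.trans (List.suffix_cons c t).isInfix),
      fun j hj hc => h.2 j hj (hc.trans (List.suffix_cons c t).isInfix)⟩]

-- ===== A's two replace-folds on tokens =====
-- the partially-substituted state after the first n steps of one replace loop
def pvUpd (files : List String) (bq : Bool) (n : Nat) (f : Bool → List Char → List Char) :
    Bool → List Char → List Char := fun b d =>
  if b = bq ∧ (∃ j : Nat, j < n ∧ pvDig j = d) ∧ f b d = pvPat b d then
    (PySem.List.pyGetD files (pvVal d : Int) "").toList
  else f b d

theorem pvUpd_pos {files : List String} {bq : Bool} {n : Nat}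
    {f : Bool → List Char → List Char} {b : Bool} {d : List Char}
    (h : b = bq ∧ (∃ j : Nat, j < n ∧ pvDig j = d) ∧ f b d = pvPat b d) :
    pvUpd files bq n f b d = (PySem.List.pyGetD files (pvVal d : Int) "").toList := by
  unfold pvUpd
  rw [if_pos h]

theorem pvUpd_neg {files : List String} {bq : Bool} {n : Nat}
    {f : Bool → List Char → List Char} {b : Bool} {d : List Char}
    (h : ¬ (b = bq ∧ (∃ j : Nat, j < n ∧ pvDig j = d) ∧ f b d = pvPat b d)) :
    pvUpd files bq n f b d = f b d := by
  unfold pvUpd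
  rw [if_neg h]

theorem pvVal_free {files : List String} {d : List Char}
    (hfiles : ∀ s ∈ files, '$' ∉ s.toList ∧ '{' ∉ s.toList ∧ s.toList ≠ [])
    (hex : ∃ j : Nat, j < files.length ∧ pvDig j = d) :
    pvGoodVal (PySem.List.pyGetD files (pvVal d : Int) "").toList := by
  obtain ⟨j, hj, rfl⟩ := hex
  rw [pvDig_val, PySem.List.pyGetD_eq_getElem files "" (by omega)
    (by exact_mod_cast hj : (j : Int) < files.length)]
  exact hfiles _ (List.getElem_mem _)

theorem pvOkF_upd (files : List String) (bq : Bool) (n : Nat) (hn : n ≤ files.length)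
    (f : Bool → List Char → List Char) (hf : pvOkF f)
    (hfiles : ∀ s ∈ files, '$' ∉ s.toList ∧ '{' ∉ s.toList ∧ s.toList ≠ []) :
    pvOkF (pvUpd files bq n f) := by
  intro b d
  by_cases hcond : b = bq ∧ (∃ j : Nat, j < n ∧ pvDig j = d) ∧ f b d = pvPat b d
  · rw [pvUpd_pos hcond]
    right
    obtain ⟨-, ⟨j, hj, rfl⟩, -⟩ := hcond
    exact pvVal_free hfiles ⟨j, by omega, rfl⟩
  · rw [pvUpd_neg hcond]
    exact hf b d

theorem pvFold_one (files : List String) (bq : Bool) (hdr : String)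
    (hhdr : ∀ k : Int, 0 ≤ k → (hdr ++ PySem.Int.toStr k ++ "]}").toList = pvPat bq (pvDig k.toNat))
    (n : Nat) (hn : n ≤ files.length) (ts : List (Char ⊕ Bool × List Char)) (hts : pvOkTs ts)
    (hch : List.IsChain pvChainP ts) (f : Bool → List Char → List Char) (hf : pvOkF f)
    (hfiles : ∀ s ∈ files, '$' ∉ s.toList ∧ '{' ∉ s.toList ∧ s.toList ≠ []) :
    ((PySem.List.pyRange 0 (n : Int) 1).foldl
      (fun s k => PySem.Chars.replace s ((hdr ++ PySem.Int.toStr k ++ "]}")).toList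
        (PySem.List.pyGetD files k "").toList) (pvRender f ts))
    = pvRender (pvUpd files bq n f) ts := by
  induction n with
  | zero =>
    rw [show ((0 : Nat) : Int) = 0 from rfl, show PySem.List.pyRange 0 0 1 = [] from by decide]
    rw [List.foldl_nil]
    apply pvRender_congr
    intro b d _
    exact (pvUpd_neg (by rintro ⟨-, ⟨j, hj, -⟩, -⟩; omega)).symm
  | succ m ihm =>
    have hcast : ((m + 1 : Nat) : Int) = (m : Int) + 1 := by push_cast; ring
    rw [hcast, PySem.List.pyRange_one_succ_right (by positivity), List.foldl_append,
      List.foldl_cons, List.foldl_nil, ihm (by omega)]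
    rw [hhdr (m : Int) (by positivity), pvReplace_eq _ _ _ (by simp [pvPat]),
      show ((m : Int)).toNat = m from by omega]
    rw [pvReplace_render ts (pvUpd files bq m f) bq (pvDig m)
      (PySem.List.pyGetD files (m : Int) "").toList hts hch
      (pvOkF_upd files bq m (by omega) f hf hfiles)
      (by
        rw [PySem.List.pyGetD_eq_getElem files "" (by positivity)
          (by exact_mod_cast by omega : (m : Int) < files.length)]
        exact hfiles _ (List.getElem_mem _))
      (pvDig_all_digit m)]
    apply pvRender_congr
    intro b d hmem
    by_cases hb : b = bq
    · subst hb
      by_cases hfp : f b d = pvPat b d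
      · by_cases hex : ∃ j : Nat, j < m ∧ pvDig j = d
        · have e1 : pvUpd files b m f b d
              = (PySem.List.pyGetD files (pvVal d : Int) "").toList := pvUpd_pos ⟨rfl, hex, hfp⟩
          have e2 : pvUpd files b (m + 1) f b d
              = (PySem.List.pyGetD files (pvVal d : Int) "").toList := by
            obtain ⟨j, hj, hjd⟩ := hex
            exact pvUpd_pos ⟨rfl, ⟨j, by omega, hjd⟩, hfp⟩
          rw [e1, e2, if_neg]
          rintro ⟨-, -, hc⟩
          obtain ⟨j, hj, hjd⟩ := hex
          exact (pvVal_free hfiles ⟨j, by omega, hjd⟩).1 (hc ▸ (by simp [pvPat] : '$' ∈ pvPat b d))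
        · have e1 : pvUpd files b m f b d = f b d := pvUpd_neg (fun hc => hex hc.2.1)
          rw [e1]
          by_cases hdn : d = pvDig m
          · have e2 : pvUpd files b (m + 1) f b d
                = (PySem.List.pyGetD files (pvVal d : Int) "").toList :=
              pvUpd_pos ⟨rfl, ⟨m, by omega, hdn.symm⟩, hfp⟩
            rw [e2, if_pos ⟨rfl, hdn, hfp⟩, hdn, pvDig_val]
          · have e2 : pvUpd files b (m + 1) f b d = f b d := by
              apply pvUpd_neg
              rintro ⟨-, ⟨j, hj, hjd⟩, -⟩
              rcases Nat.lt_succ_iff_lt_or_eq.mp hj with hj' | rfl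
              · exact hex ⟨j, hj', hjd⟩
              · exact hdn hjd.symm
            rw [e2, if_neg (fun hc => hdn hc.2.1)]
      · have e1 : pvUpd files b m f b d = f b d := pvUpd_neg (fun hc => hfp hc.2.2)
        have e2 : pvUpd files b (m + 1) f b d = f b d := pvUpd_neg (fun hc => hfp hc.2.2)
        rw [e1, e2, if_neg (fun hc => hfp hc.2.2)]
    · have e1 : pvUpd files bq m f b d = f b d := pvUpd_neg (fun hc => hb hc.1)
      have e2 : pvUpd files bq (m + 1) f b d = f b d := pvUpd_neg (fun hc => hb hc.1)
      rw [e1, e2, if_neg (fun hc => hb hc.1)]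

theorem pvFold_render (o i : List String) (ts : List (Char ⊕ Bool × List Char))
    (hts : pvOkTs ts) (hch : List.IsChain pvChainP ts)
    (ho : ∀ f ∈ o, '$' ∉ f.toList ∧ '{' ∉ f.toList ∧ f.toList ≠ [])
    (hi : ∀ f ∈ i, '$' ∉ f.toList ∧ '{' ∉ f.toList ∧ f.toList ≠ []) :
    ((PySem.List.pyRange 0 (i.length : Int) 1).foldl
      (fun s k => PySem.Chars.replace s ("${SOURCES[" ++ PySem.Int.toStr k ++ "]}").toList
        (PySem.List.pyGetD i k "").toList)
      ((PySem.List.pyRange 0 (o.length : Int) 1).foldl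
        (fun s k => PySem.Chars.replace s ("${TARGETS[" ++ PySem.Int.toStr k ++ "]}").toList
          (PySem.List.pyGetD o k "").toList) (pvRender pvPat ts)))
    = pvRender (pvStar o i) ts := by
  have hT := pvFold_one o true "${TARGETS[" (fun k hk => pvHdr_targets k hk) o.length le_rfl
    ts hts hch pvPat (fun b d => Or.inl rfl) ho
  have hS := pvFold_one i false "${SOURCES[" (fun k hk => pvHdr_sources k hk) i.length le_rfl
    ts hts hch _ (pvOkF_upd o true o.length le_rfl pvPat (fun b d => Or.inl rfl) ho) hi
  rw [hT, hS]
  apply pvRender_congr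
  intro b d hmem
  obtain ⟨hdne, hdig⟩ := hts (Sum.inr (b, d)) hmem
  cases b
  · have hinner : pvUpd o true o.length pvPat false d = pvPat false d := pvUpd_neg (by simp)
    by_cases hex : ∃ j : Nat, j < i.length ∧ pvDig j = d
    · rw [pvUpd_pos ⟨rfl, hex, hinner⟩, pvStar,
        if_pos (by simpa using (pvExists_iff d i.length hdne hdig).mp hex)]
      simp
    · rw [pvUpd_neg (fun hc => hex hc.2.1), hinner, pvStar,
        if_neg (by simpa using fun hc hv => hex ((pvExists_iff d i.length hdne hdig).mpr ⟨hc, hv⟩))]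
  · have houter : pvUpd i false i.length (pvUpd o true o.length pvPat) true d
        = pvUpd o true o.length pvPat true d := pvUpd_neg (by simp)
    rw [houter]
    by_cases hex : ∃ j : Nat, j < o.length ∧ pvDig j = d
    · rw [pvUpd_pos ⟨rfl, hex, rfl⟩, pvStar,
        if_pos (by simpa using (pvExists_iff d o.length hdne hdig).mp hex)]
      simp
    · rw [pvUpd_neg (fun hc => hex hc.2.1), pvStar,
        if_neg (by simpa using fun hc hv => hex ((pvExists_iff d o.length hdne hdig).mpr ⟨hc, hv⟩))]

theorem pvFold_id (files : List String) (bq : Bool) (hdr : String)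
    (hhdr : ∀ k : Int, 0 ≤ k → (hdr ++ PySem.Int.toStr k ++ "]}").toList = pvPat bq (pvDig k.toNat))
    (n : Nat) (cs : List Char)
    (h : ∀ j < n, ¬ pvPat bq (pvDig j) <:+: cs) :
    ((PySem.List.pyRange 0 (n : Int) 1).foldl
      (fun s k => PySem.Chars.replace s ((hdr ++ PySem.Int.toStr k ++ "]}")).toList
        (PySem.List.pyGetD files k "").toList) cs) = cs := by
  induction n with
  | zero =>
    rw [show ((0 : Nat) : Int) = 0 from rfl, show PySem.List.pyRange 0 0 1 = [] from by decide]
    rfl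
  | succ m ihm =>
    have hcast : ((m + 1 : Nat) : Int) = (m : Int) + 1 := by push_cast; ring
    rw [hcast, PySem.List.pyRange_one_succ_right (by positivity), List.foldl_append,
      List.foldl_cons, List.foldl_nil, ihm (fun j hj => h j (by omega))]
    rw [hhdr (m : Int) (by positivity), pvReplace_eq _ _ _ (by simp [pvPat]),
      show ((m : Int)).toNat = m from by omega]
    exact pvMyRep_id _ _ _ (h m (by omega))

-- ===== VERDICT (by name: the statement is the Claim_ definition above) =====
theorem clean_cmd_spec : Claim_equal_clean_cmd := by
  intro o i cmd _ hpre
  obtain ⟨ho0, hmain⟩ := hpre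
  rcases hmain with ⟨hno1, hno2⟩ | ⟨hfiles, hcmd⟩
  · -- no-placeholder branch: both sides leave cmd unchanged
    have hno1' : ∀ j < o.length, ¬ pvPat true (pvDig j) <:+: cmd.toList := fun j hj => by
      have h := (PySem.Chars.isIn_eq_false_iff _ _).mp (hno1 j hj)
      rwa [pvHdr_targets (j : Int) (by positivity), Int.toNat_natCast] at h
    have hno2' : ∀ j < i.length, ¬ pvPat false (pvDig j) <:+: cmd.toList := fun j hj => by
      have h := (PySem.Chars.isIn_eq_false_iff _ _).mp (hno2 j hj)
      rwa [pvHdr_sources (j : Int) (by positivity), Int.toNat_natCast] at h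
    have hA1 := pvFold_id o true "${TARGETS[" (fun k hk => pvHdr_targets k hk) o.length
      cmd.toList hno1'
    have hA2 := pvFold_id i false "${SOURCES[" (fun k hk => pvHdr_sources k hk) i.length
      cmd.toList hno2'
    have hB := pvScan_id o i cmd.toList ⟨hno1', hno2'⟩
    unfold Spec_clean_cmd
    simp only [clean_cmd, clean_cmd_alt]
    rw [hA1, hA2, hB]
  · obtain ⟨ts, hts, hch, hcs, -⟩ := pvTokenize cmd.toList hcmd
    have ho : ∀ f ∈ o, '$' ∉ f.toList ∧ '{' ∉ f.toList ∧ f.toList ≠ [] :=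
      fun f hf => hfiles f (List.mem_append_left _ hf)
    have hi : ∀ f ∈ i, '$' ∉ f.toList ∧ '{' ∉ f.toList ∧ f.toList ≠ [] :=
      fun f hf => hfiles f (List.mem_append_right _ hf)
    have hA := pvFold_render o i ts hts hch ho hi
    have hB := pvScan_render o i ts hts hch
    unfold Spec_clean_cmd
    simp only [clean_cmd, clean_cmd_alt]
    rw [hcs, hA, hB]
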